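-- pv_equiv track=rewrite | github.com/v-pereskokov/Head_Hunters | HH_parser.py | clear_price
-- ===== SOURCE A (Python) =====
-- def clear_price(price):
--     result_price = ''
--     for char in price:
--         if char.isdigit():
--             result_price += char
--         elif char == '-':
--             break
--     return result_price
-- ===== SOURCE B (Python) =====
-- def clear_price(price):
--     prefix = price.split('-', 1)[0]
--     return ''.join(c for c in prefix if c.isdigit())
-- ===== Notes on version B (the rewrite author's own statement) =====
-- stated objective: simpler
-- what changed: Replaces the single early-terminating accumulation loop with a two-phase decomposition: split off the substring before the first '-' (capturing the break), then filter it down to its digits.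
import Mathlib
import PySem

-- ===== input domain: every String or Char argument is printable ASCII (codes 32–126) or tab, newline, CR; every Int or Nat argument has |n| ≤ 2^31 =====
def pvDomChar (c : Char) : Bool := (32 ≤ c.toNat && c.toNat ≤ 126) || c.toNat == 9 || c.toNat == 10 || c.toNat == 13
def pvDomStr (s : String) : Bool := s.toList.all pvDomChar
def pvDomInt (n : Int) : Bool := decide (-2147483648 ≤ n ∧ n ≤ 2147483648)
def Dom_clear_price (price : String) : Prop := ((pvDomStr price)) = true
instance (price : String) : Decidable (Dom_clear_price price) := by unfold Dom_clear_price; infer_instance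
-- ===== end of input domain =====

-- B replaces A's single early-terminating accumulation loop with a two-phase
-- decomposition: split off the substring before the first '-' , then filter it to its digits (objective: simpler).


-- ===== PORT A =====
-- the loop: accumulate digits, break on '-'
def clearLoopA : List Char → String → String
  | [], acc => acc
  | c :: cs, acc =>
    if PySem.Chars.isdigit c then clearLoopA cs (acc.push c)
    else if c = '-' then acc
    else clearLoopA cs acc

def clear_price (price : String) : String := clearLoopA price.toList ""

-- ===== PORT B =====
def clear_price_alt (price : String) : String :=
  let pre :=
    match PySem.Str.splitMax? price "-" 1 with
    | some (p :: _) => p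
    | _ => ""          -- unreachable: sep ≠ "" and split always yields a nonempty list
  String.ofList (pre.toList.filter PySem.Chars.isdigit)

-- ===== PRECONDITION & SPEC =====
def Spec_clear_price (price : String) (out : String) : Prop := out = clear_price_alt price
instance (price : String) (out : String) : Decidable (Spec_clear_price price out) := by unfold Spec_clear_price; infer_instance

-- ===== CLAIM (what is proved, stated in full; the proofs are below) =====
def Claim_equal_clear_price : Prop := ∀ (price : String), Dom_clear_price price → Spec_clear_price price (clear_price price)

-- ===== LEMMAS AND PROOFS =====

-- A's loop computes: append the digits of the part before the first '-'
theorem clearLoopA_eq (cs : List Char) (acc : String) :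
    clearLoopA cs acc = String.ofList (acc.toList ++ ((cs.takeWhile (· ≠ '-')).filter PySem.Chars.isdigit)) := by
  induction cs generalizing acc with
  | nil => simp [clearLoopA]
  | cons c cs ih =>
    by_cases hd : PySem.Chars.isdigit c
    · have hne : c ≠ '-' := by
        intro h; subst h; simp [PySem.Chars.isdigit] at hd
      rw [clearLoopA, if_pos hd, ih]
      simp [List.takeWhile, hne, hd]
    · by_cases hm : c = '-'
      · subst hm
        rw [clearLoopA, if_neg hd, if_pos rfl]
        simp [List.takeWhile]
      · rw [clearLoopA, if_neg hd, if_neg hm, ih]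
        simp [List.takeWhile, hm, hd]

-- the accumulator of splitOnMax.go prepends (reversed) to the result
theorem go_acc (sep : List Char) (fuel m : Nat) (l cur : List Char) (acc : List (List Char)) :
    PySem.Chars.splitOnMax.go sep fuel m l cur acc
      = acc.reverse ++ PySem.Chars.splitOnMax.go sep fuel m l cur [] := by
  induction fuel generalizing m l cur acc with
  | zero => simp [PySem.Chars.splitOnMax.go]
  | succ fuel ih =>
    cases l with
    | nil => simp [PySem.Chars.splitOnMax.go]
    | cons c rest =>
      by_cases hm : m = 0
      · simp [PySem.Chars.splitOnMax.go, hm]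
      · by_cases hp : sep.isPrefixOf (c :: rest) = true
        · rw [PySem.Chars.splitOnMax.go, PySem.Chars.splitOnMax.go]
          simp only [hm, hp, if_pos]
          rw [ih _ _ _ (cur.reverse :: acc), ih _ _ _ [cur.reverse]]
          simp
        · rw [PySem.Chars.splitOnMax.go, PySem.Chars.splitOnMax.go]
          simp only [hm, hp, Bool.false_eq_true, ite_false]
          rw [ih _ _ _ acc]

-- the first piece of split('-', 1) is the prefix before the first '-'
theorem go_head (fuel : Nat) (l cur : List Char) (hf : l.length ≤ fuel) :
    (PySem.Chars.splitOnMax.go ['-'] fuel 1 l cur []).head?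
      = some (cur.reverse ++ l.takeWhile (· ≠ '-')) := by
  induction fuel generalizing l cur with
  | zero =>
    have : l = [] := List.eq_nil_of_length_eq_zero (Nat.le_zero.mp hf)
    subst this
    simp [PySem.Chars.splitOnMax.go]
  | succ fuel ih =>
    cases l with
    | nil => simp [PySem.Chars.splitOnMax.go]
    | cons c rest =>
      by_cases hc : c = '-'
      · subst hc
        rw [PySem.Chars.splitOnMax.go]
        have hp : List.isPrefixOf ['-'] ('-' :: rest) = true := by
          simp [List.isPrefixOf]
        simp only [Nat.one_ne_zero, hp, if_pos, ite_false]
        rw [go_acc]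
        simp [List.takeWhile]
      · rw [PySem.Chars.splitOnMax.go]
        have hp : List.isPrefixOf ['-'] (c :: rest) = false := by
          simp [List.isPrefixOf]; exact fun h => absurd h.symm hc
        simp only [Nat.one_ne_zero, hp, Bool.false_eq_true, ite_false]
        rw [ih rest (c :: cur) (by simpa using Nat.le_of_succ_le_succ hf)]
        simp [List.takeWhile, hc]

-- ===== VERDICT (by name: the statement is the Claim_ definition above) =====
theorem clear_price_spec : Claim_equal_clear_price := by
  intro price _
  unfold Spec_clear_price clear_price clear_price_alt
  rw [clearLoopA_eq]
  have hs : PySem.Chars.splitMax? price.toList ['-'] 1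
      = some (PySem.Chars.splitOnMax price.toList ['-'] 1) := by
    simp [PySem.Chars.splitMax?]
  have hgo : PySem.Chars.splitOnMax price.toList ['-'] 1
      = PySem.Chars.splitOnMax.go ['-'] (price.toList.length + 1) 1 price.toList [] [] := by
    simp [PySem.Chars.splitOnMax]
  have hh := go_head (price.toList.length + 1) price.toList [] (by omega)
  rw [← hgo] at hh
  rcases hsplit : PySem.Chars.splitOnMax price.toList ['-'] 1 with _ | ⟨p, ps⟩
  · rw [hsplit] at hh; simp at hh
  · rw [hsplit] at hh
    simp only [List.head?] at hh
    have hp : p = price.toList.takeWhile (· ≠ '-') := by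
      simpa using hh
    have : PySem.Str.splitMax? price "-" 1
        = some ((p :: ps).map String.ofList) := by
      simp only [PySem.Str.splitMax?]
      have : ("-" : String).toList = ['-'] := rfl
      rw [this, hs, hsplit]
      rfl
    rw [this]
    simp only [List.map_cons]
    simp [hp]
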